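-- pv_equiv track=rewrite | github.com/pedramnj/A14K8s | ai_processor.py | _extract_pod_name
-- ===== SOURCE A (Python) =====
-- def _extract_pod_name(query_lower: str) -> str:
--     """Extract pod name for deletion"""
--     # Look for "delete X pod" pattern
--     if 'delete' in query_lower:
--         words = query_lower.split()
--         for i, word in enumerate(words):
--             if word == 'delete' and i + 1 < len(words):
--                 next_word = words[i + 1]
--                 if next_word != 'pod' and next_word != 'the':
--                     return next_word
--
--     # Look for "delete pod X" pattern
--     if 'pod' in query_lower:
--         words = query_lower.split()
--         for i, word in enumerate(words):
--             if word == 'pod' and i + 1 < len(words):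
--                 return words[i + 1]
--
--     # Look for "delete the X pod" pattern
--     if 'the' in query_lower:
--         words = query_lower.split()
--         for i, word in enumerate(words):
--             if word == 'the' and i + 1 < len(words):
--                 return words[i + 1]
--
--     return None
-- ===== SOURCE B (Python) =====
-- def _extract_pod_name(query_lower: str) -> str:
--     """Extract pod name for deletion: split once, single pass keeping the first
--     qualifying successor of 'delete' (excluding 'pod'/'the'), of 'pod', and of
--     'the', then return them in priority order."""
--     words = query_lower.split()
--     delete_cand = pod_cand = the_cand = None
--     for i in range(len(words) - 1):
--         w, nxt = words[i], words[i + 1]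
--         if delete_cand is None and w == 'delete' and nxt != 'pod' and nxt != 'the':
--             delete_cand = nxt
--         if pod_cand is None and w == 'pod':
--             pod_cand = nxt
--         if the_cand is None and w == 'the':
--             the_cand = nxt
--     return delete_cand or pod_cand or the_cand
-- ===== Notes on version B (the rewrite author's own statement) =====
-- stated objective: simpler
-- what changed: Replaces A's three substring-gated re-splits and re-scans of the word list by one split and one pass that records the first qualifying successor of each of the three keywords, combined afterwards in priority order.
import Mathlib
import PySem

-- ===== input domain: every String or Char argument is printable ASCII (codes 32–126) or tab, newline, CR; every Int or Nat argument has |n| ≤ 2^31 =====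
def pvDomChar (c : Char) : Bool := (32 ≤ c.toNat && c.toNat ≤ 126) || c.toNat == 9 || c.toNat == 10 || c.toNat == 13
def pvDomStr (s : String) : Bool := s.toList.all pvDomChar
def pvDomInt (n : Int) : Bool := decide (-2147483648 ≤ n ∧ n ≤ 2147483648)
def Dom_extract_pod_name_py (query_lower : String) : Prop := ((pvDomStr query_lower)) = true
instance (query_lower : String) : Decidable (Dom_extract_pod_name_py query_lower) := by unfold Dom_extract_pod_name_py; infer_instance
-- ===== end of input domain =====

-- B replaces A's three substring-gated re-splits and re-scans by one split and one
-- pass keeping three first-match slots, combined in priority order (objective: simpler).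

-- ===== PORT A =====
-- A's first loop: first words[i+1] after a word 'delete' with a successor not in {'pod','the'}
def pvA_phase1 : List String → Option String
  | w :: nw :: rest =>
      if w = "delete" then
        if nw ≠ "pod" ∧ nw ≠ "the" then some nw else pvA_phase1 (nw :: rest)
      else pvA_phase1 (nw :: rest)
  | _ => none

-- A's second and third loops share this shape: first words[i+1] after a word equal to kw
def pvA_after (kw : String) : List String → Option String
  | w :: nw :: rest => if w = kw then some nw else pvA_after kw (nw :: rest)
  | _ => none

def extract_pod_name_py (query_lower : String) : Option String :=
  let r1 := if PySem.Str.isIn "delete" query_lower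
            then pvA_phase1 (PySem.Str.split₀ query_lower) else none
  if r1.isSome then r1 else
  let r2 := if PySem.Str.isIn "pod" query_lower
            then pvA_after "pod" (PySem.Str.split₀ query_lower) else none
  if r2.isSome then r2 else
  if PySem.Str.isIn "the" query_lower
  then pvA_after "the" (PySem.Str.split₀ query_lower) else none

-- ===== PORT B =====
-- B's single pass over consecutive word pairs, maintaining three first-match slots.
def pvB_scan : List String → Option String → Option String → Option String →
    Option String × Option String × Option String
  | w :: nw :: rest, d, p, t =>
      let d' := if d = none ∧ w = "delete" ∧ nw ≠ "pod" ∧ nw ≠ "the" then some nw else d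
      let p' := if p = none ∧ w = "pod" then some nw else p
      let t' := if t = none ∧ w = "the" then some nw else t
      pvB_scan (nw :: rest) d' p' t'
  | _, d, p, t => (d, p, t)

-- Python's 'x or y' on the candidates is Option.or: the candidates are words from
-- split(), hence never the falsy empty string.
def extract_pod_name_py_alt (query_lower : String) : Option String :=
  let r := pvB_scan (PySem.Str.split₀ query_lower) none none none
  r.1.or (r.2.1.or r.2.2)

-- ===== PRECONDITION & SPEC =====
def Spec_extract_pod_name_py (query_lower : String) (out : Option String) : Prop := out = extract_pod_name_py_alt query_lower
instance (query_lower : String) (out : Option String) : Decidable (Spec_extract_pod_name_py query_lower out) := by unfold Spec_extract_pod_name_py; infer_instance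

-- ===== CLAIM (what is proved, stated in full; the proofs are below) =====
def Claim_equal_extract_pod_name_py : Prop := ∀ (query_lower : String), Dom_extract_pod_name_py query_lower → Spec_extract_pod_name_py query_lower (extract_pod_name_py query_lower)

-- ===== LEMMAS AND PROOFS =====

-- every piece split₀ produces is an infix of the input
theorem pv_go_mem_infix (s cur : List Char) (acc : List (List Char)) (w : List Char)
    (h : w ∈ PySem.Chars.split₀.go s cur acc) : w ∈ acc ∨ w <:+: (cur.reverse ++ s) := by
  induction s generalizing cur acc with
  | nil =>
      simp only [PySem.Chars.split₀.go] at h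
      split at h
      · simp_all
      · simp only [List.mem_reverse, List.mem_cons] at h
        rcases h with h | h
        · right; exact ⟨[], [], by simp [h]⟩
        · left; exact h
  | cons c rest ih =>
      simp only [PySem.Chars.split₀.go] at h
      split at h
      · split at h
        · rcases ih _ _ h with h' | h'
          · exact Or.inl h'
          · exact Or.inr (h'.trans ⟨cur.reverse ++ [c], [], by simp⟩)
        · rcases ih _ _ h with h' | h'
          · rcases List.mem_cons.mp h' with h2 | h2
            · exact Or.inr ⟨[], c :: rest, by simp [h2]⟩
            · exact Or.inl h2
          · exact Or.inr (h'.trans ⟨cur.reverse ++ [c], [], by simp⟩)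
      · rcases ih _ _ h with h' | h'
        · exact Or.inl h'
        · exact Or.inr (by simpa using h')

theorem pv_mem_split₀_isIn (q w : String) (h : w ∈ PySem.Str.split₀ q) :
    PySem.Str.isIn w q = true := by
  simp only [PySem.Str.split₀, List.mem_map] at h
  obtain ⟨ws, hws, rfl⟩ := h
  rcases pv_go_mem_infix q.toList [] [] ws hws with h' | h'
  · simp at h'
  · rw [PySem.Str.isIn_iff_infix]
    simpa using h'

theorem pv_phase1_mem {ws : List String} {r : String} (h : pvA_phase1 ws = some r) :
    "delete" ∈ ws := by
  induction ws with
  | nil => simp [pvA_phase1] at h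
  | cons w rest ih =>
      match rest, h with
      | [], h => simp [pvA_phase1] at h
      | nw :: rest', h =>
          simp only [pvA_phase1] at h
          split at h
          · simp_all
          · exact List.mem_cons_of_mem _ (ih h)

theorem pv_after_mem {kw : String} {ws : List String} {r : String}
    (h : pvA_after kw ws = some r) : kw ∈ ws := by
  induction ws with
  | nil => simp [pvA_after] at h
  | cons w rest ih =>
      match rest, h with
      | [], h => simp [pvA_after] at h
      | nw :: rest', h =>
          simp only [pvA_after] at h
          split at h
          · simp_all
          · exact List.mem_cons_of_mem _ (ih h)

theorem pv_scan_eq (ws : List String) (d p t : Option String) :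
    pvB_scan ws d p t =
      (d.or (pvA_phase1 ws), p.or (pvA_after "pod" ws), t.or (pvA_after "the" ws)) := by
  induction ws generalizing d p t with
  | nil => simp [pvB_scan, pvA_phase1, pvA_after]
  | cons w rest ih =>
      match rest with
      | [] => cases d <;> cases p <;> cases t <;> simp [pvB_scan, pvA_phase1, pvA_after]
      | nw :: rest' =>
          simp only [pvB_scan, ih, pvA_phase1, pvA_after]
          cases d <;> cases p <;> cases t <;>
            by_cases h1 : w = "delete" <;> by_cases h2 : w = "pod" <;>
            by_cases h3 : w = "the" <;> by_cases h4 : nw = "pod" <;>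
            by_cases h5 : nw = "the" <;> simp_all

-- a gated phase equals the phase itself: if the phase finds a word, the keyword is a word
-- of the split, hence a substring of the query
theorem pv_gate_phase1 (q : String) :
    (if PySem.Str.isIn "delete" q then pvA_phase1 (PySem.Str.split₀ q) else none)
      = pvA_phase1 (PySem.Str.split₀ q) := by
  cases h : pvA_phase1 (PySem.Str.split₀ q) with
  | none => split <;> rfl
  | some r => rw [pv_mem_split₀_isIn q _ (pv_phase1_mem h)]; simp

theorem pv_gate_after (q kw : String) :
    (if PySem.Str.isIn kw q then pvA_after kw (PySem.Str.split₀ q) else none)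
      = pvA_after kw (PySem.Str.split₀ q) := by
  cases h : pvA_after kw (PySem.Str.split₀ q) with
  | none => split <;> rfl
  | some r => rw [pv_mem_split₀_isIn q _ (pv_after_mem h)]; simp

-- ===== VERDICT (by name: the statement is the Claim_ definition above) =====
theorem extract_pod_name_py_spec : Claim_equal_extract_pod_name_py := by
  intro q _
  unfold Spec_extract_pod_name_py extract_pod_name_py extract_pod_name_py_alt
  rw [pv_gate_phase1, pv_gate_after, pv_gate_after, pv_scan_eq]
  cases pvA_phase1 (PySem.Str.split₀ q) <;>
    cases pvA_after "pod" (PySem.Str.split₀ q) <;>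
    cases pvA_after "the" (PySem.Str.split₀ q) <;> simp
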